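-- pv_equiv track=rewrite | github.com/CRazypZival/ExpressLRS | src/python/merge_bin_to_hex.py | bin_to_hex_line
-- ===== SOURCE A (Python) =====
-- def bin_to_hex_line(address, data):
--     """Convert binary data to Intel HEX format lines."""
--     lines = []
--     offset = 0
--     last_upper_addr = -1
--
--     while offset < len(data):
--         # Calculate chunk size (max 16 bytes per line)
--         chunk_size = min(16, len(data) - offset)
--         chunk = data[offset:offset + chunk_size]
--
--         # Calculate current address
--         current_addr = address + offset
--
--         # Check if we need an extended address record (for addresses > 0xFFFF)
--         upper_addr = (current_addr >> 16) & 0xFFFF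
--         if upper_addr != last_upper_addr:
--             # Extended Linear Address Record (Type 04)
--             ext_record = [2, 0, 0, 0x04, (upper_addr >> 8) & 0xFF, upper_addr & 0xFF]
--             checksum = (~sum(ext_record) + 1) & 0xFF
--             lines.append(":%02X%04X%02X%04X%02X" % (2, 0, 0x04, upper_addr, checksum))
--             last_upper_addr = upper_addr
--
--         # Use lower 16 bits for the data record
--         record_addr = current_addr & 0xFFFF
--
--         # Data Record (Type 00)
--         record = [chunk_size, (record_addr >> 8) & 0xFF, record_addr & 0xFF, 0x00]
--         record.extend(chunk)
--         checksum = (~sum(record) + 1) & 0xFF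
--
--         hex_data = ''.join(['%02X' % b for b in chunk])
--         lines.append(":%02X%04X%02X%s%02X" % (chunk_size, record_addr, 0x00, hex_data, checksum))
--
--         offset += chunk_size
--
--     return lines
-- ===== SOURCE B (Python) =====
-- def _emit_record(count, addr, rtype, payload):
--     body = [count, (addr >> 8) & 0xFF, addr & 0xFF, rtype] + payload
--     checksum = (~sum(body) + 1) & 0xFF
--     hex_payload = ''.join(['%02X' % b for b in payload])
--     return ":%02X%04X%02X%s%02X" % (count, addr & 0xFFFF, rtype, hex_payload, checksum)
--
--
-- def bin_to_hex_line(address, data):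
--     """Convert binary data to Intel HEX format lines."""
--     # Pre-split into 16-byte chunks tagged with their absolute start address,
--     # then walk the chunk list segment by segment (same upper 16 address bits):
--     # one Type-04 record per segment, then its Type-00 data records.
--     chunks = [(address + off, data[off:off + 16]) for off in range(0, len(data), 16)]
--     lines = []
--     while chunks:
--         upper = (chunks[0][0] >> 16) & 0xFFFF
--         lines.append(_emit_record(2, 0, 0x04, [(upper >> 8) & 0xFF, upper & 0xFF]))
--         while chunks and ((chunks[0][0] >> 16) & 0xFFFF) == upper:
--             addr, chunk = chunks.pop(0)
--             lines.append(_emit_record(len(chunk), addr & 0xFFFF, 0x00, chunk))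
--     return lines
-- ===== Notes on version B (the rewrite author's own statement) =====
-- stated objective: alternative
-- what changed: Replaced the single flat offset loop with a last-upper-address state flag by a precomputed chunk list walked as a two-level segment/chunk nesting, with one shared record-assembly helper for both record types.
import Mathlib
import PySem

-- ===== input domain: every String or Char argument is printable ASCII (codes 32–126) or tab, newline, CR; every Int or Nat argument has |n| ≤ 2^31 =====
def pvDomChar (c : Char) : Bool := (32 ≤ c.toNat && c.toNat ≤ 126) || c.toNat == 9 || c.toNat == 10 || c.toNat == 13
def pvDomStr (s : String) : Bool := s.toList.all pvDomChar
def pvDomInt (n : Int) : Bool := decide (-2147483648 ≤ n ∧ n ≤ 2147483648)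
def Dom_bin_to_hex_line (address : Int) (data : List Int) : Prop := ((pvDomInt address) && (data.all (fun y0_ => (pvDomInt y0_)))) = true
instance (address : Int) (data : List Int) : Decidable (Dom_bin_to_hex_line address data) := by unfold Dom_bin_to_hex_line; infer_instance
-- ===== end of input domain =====

-- B restructures A's flat offset loop (with a last-upper-address flag) into a precomputed
-- chunk list walked segment-by-segment with a shared record-assembly helper; same output.

-- ===== shared formatting primitive (Python's "%0NX" % x, exact incl. negatives) =====
def hexDigit (n : Nat) : Char :=
  (['0','1','2','3','4','5','6','7','8','9','A','B','C','D','E','F']).getD n '0'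

def hexCore (n : Nat) : List Char :=
  if h : n < 16 then [hexDigit n]
  else hexCore (n / 16) ++ [hexDigit (n % 16)]
termination_by n
decreasing_by exact Nat.div_lt_self (by omega) (by omega)

-- "%0wX" % x : zero-pad to width w; for x < 0 the '-' sign counts toward the width
def fmtHex (w : Nat) (x : Int) : List Char :=
  if x < 0 then '-' :: (List.replicate (w - 1 - (hexCore x.natAbs).length) '0' ++ hexCore x.natAbs)
  else List.replicate (w - (hexCore x.toNat).length) '0' ++ hexCore x.toNat

-- ===== PORT A =====
def binToHexLoop (address : Int) (data : List Int) (offset : Nat) (lastUpper : Int)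
    (lines : List String) : List String :=
  if h : offset < data.length then
    let chunk_size : Nat := min 16 (data.length - offset)
    let chunk := PySem.List.slice data (some (offset : Int)) (some ((offset : Int) + (chunk_size : Int)))
    let current_addr := address + (offset : Int)
    let upper := PySem.Int.band (current_addr >>> (16:Nat)) 0xFFFF
    let st :=
      if upper ≠ lastUpper then
        let ext_record : List Int := [2, 0, 0, 0x04, PySem.Int.band (upper >>> (8:Nat)) 0xFF, PySem.Int.band upper 0xFF]
        let checksum := PySem.Int.band (Int.not ext_record.sum + 1) 0xFF
        (lines ++ [String.ofList (':' :: fmtHex 2 2 ++ fmtHex 4 0 ++ fmtHex 2 0x04 ++ fmtHex 4 upper ++ fmtHex 2 checksum)],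
         upper)
      else (lines, lastUpper)
    let record_addr := PySem.Int.band current_addr 0xFFFF
    let record : List Int := [(chunk_size : Int), PySem.Int.band (record_addr >>> (8:Nat)) 0xFF, PySem.Int.band record_addr 0xFF, 0x00] ++ chunk
    let checksum := PySem.Int.band (Int.not record.sum + 1) 0xFF
    let hex_data := (chunk.map (fun b => fmtHex 2 b)).flatten
    let lines2 := st.1 ++ [String.ofList (':' :: fmtHex 2 (chunk_size : Int) ++ fmtHex 4 record_addr ++ fmtHex 2 0x00 ++ hex_data ++ fmtHex 2 checksum)]
    binToHexLoop address data (offset + chunk_size) st.2 lines2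
  else lines
termination_by data.length - offset
decreasing_by omega

def bin_to_hex_line (address : Int) (data : List Int) : List String :=
  binToHexLoop address data 0 (-1) []

-- ===== PORT B =====
def emitRecord (count : Int) (addr : Int) (rtype : Int) (payload : List Int) : String :=
  let body : List Int := [count, PySem.Int.band (addr >>> (8:Nat)) 0xFF, PySem.Int.band addr 0xFF, rtype] ++ payload
  let checksum := PySem.Int.band (Int.not body.sum + 1) 0xFF
  let hex_payload := (payload.map (fun b => fmtHex 2 b)).flatten
  String.ofList (':' :: fmtHex 2 count ++ fmtHex 4 (PySem.Int.band addr 0xFFFF) ++ fmtHex 2 rtype ++ hex_payload ++ fmtHex 2 checksum)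

def chunkUpper (c : Int × List Int) : Int := PySem.Int.band (c.1 >>> (16:Nat)) 0xFFFF

def segLoop : List (Int × List Int) → List String
  | [] => []
  | c0 :: tl =>
    let upper := chunkUpper c0
    let seg := (c0 :: tl).takeWhile (fun c => chunkUpper c == upper)
    let rest := (c0 :: tl).dropWhile (fun c => chunkUpper c == upper)
    emitRecord 2 0 0x04 [PySem.Int.band (upper >>> (8:Nat)) 0xFF, PySem.Int.band upper 0xFF] ::
      (seg.map (fun c => emitRecord (c.2.length : Int) (PySem.Int.band c.1 0xFFFF) 0x00 c.2) ++ segLoop rest)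
termination_by chunks => chunks.length
decreasing_by
  simp only [List.dropWhile_cons, beq_self_eq_true, if_true, List.length_cons]
  have := List.length_dropWhile_le (fun c => chunkUpper c == chunkUpper c0) tl
  omega

def bin_to_hex_line_alt (address : Int) (data : List Int) : List String :=
  let chunks := (PySem.List.pyRange 0 (data.length : Int) 16).map
    (fun off => (address + off, PySem.List.slice data (some off) (some (off + 16))))
  segLoop chunks

-- ===== PRECONDITION & SPEC =====
def Spec_bin_to_hex_line (address : Int) (data : List Int) (out : List String) : Prop := out = bin_to_hex_line_alt address data
instance (address : Int) (data : List Int) (out : List String) : Decidable (Spec_bin_to_hex_line address data out) := by unfold Spec_bin_to_hex_line; infer_instance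

-- ===== CLAIM (what is proved, stated in full; the proofs are below) =====
def Claim_equal_bin_to_hex_line : Prop := ∀ (address : Int) (data : List Int), Dom_bin_to_hex_line address data → Spec_bin_to_hex_line address data (bin_to_hex_line address data)

-- ===== LEMMAS AND PROOFS =====

-- proof-side vocabulary
def extLine (u : Int) : String :=
  emitRecord 2 0 0x04 [PySem.Int.band (u >>> (8:Nat)) 0xFF, PySem.Int.band u 0xFF]

def dataLine (c : Int × List Int) : String :=
  emitRecord (c.2.length : Int) (PySem.Int.band c.1 0xFFFF) 0x00 c.2

-- A's flat loop, restated over the chunk list with the running last-upper state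
def process : List (Int × List Int) → Int → List String
  | [], _ => []
  | c :: cs, last =>
    (if chunkUpper c = last then [] else [extLine (chunkUpper c)]) ++
      (dataLine c :: process cs (chunkUpper c))

-- the chunk decomposition A's offset loop walks
def chunksFrom (address : Int) (data : List Int) (offset : Nat) : List (Int × List Int) :=
  if h : offset < data.length then
    (address + (offset : Int), (data.drop offset).take 16) ::
      chunksFrom address data (offset + min 16 (data.length - offset))
  else []
termination_by data.length - offset
decreasing_by omega

-- arithmetic bridges
lemma band_65535 (a : Int) : PySem.Int.band a 65535 = a % 65536 := by
  unfold PySem.Int.band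
  have h2 : (65535 : Int).toNat = 65535 := rfl
  by_cases h : 0 ≤ a
  · rw [if_pos h, if_pos (by norm_num), h2]
    have h1 : a.toNat &&& 65535 = a.toNat % 65536 := by
      have := Nat.and_two_pow_sub_one_eq_mod a.toNat 16
      norm_num at this; exact this
    omega
  · rw [if_neg h, if_pos (by norm_num), h2]
    simp only [show (-a - 1).toNat = (-a).toNat - 1 from by omega]
    have h1 : 65535 &&& ((-a).toNat - 1) = ((-a).toNat - 1) % 65536 := by
      have := Nat.and_two_pow_sub_one_eq_mod ((-a).toNat - 1) 16
      norm_num at this; rw [Nat.and_comm]; exact this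
    omega

lemma band_255 (a : Int) : PySem.Int.band a 255 = a % 256 := by
  unfold PySem.Int.band
  have h2 : (255 : Int).toNat = 255 := rfl
  by_cases h : 0 ≤ a
  · rw [if_pos h, if_pos (by norm_num), h2]
    have h1 : a.toNat &&& 255 = a.toNat % 256 := by
      have := Nat.and_two_pow_sub_one_eq_mod a.toNat 8
      norm_num at this; exact this
    omega
  · rw [if_neg h, if_pos (by norm_num), h2]
    simp only [show (-a - 1).toNat = (-a).toNat - 1 from by omega]
    have h1 : 255 &&& ((-a).toNat - 1) = ((-a).toNat - 1) % 256 := by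
      have := Nat.and_two_pow_sub_one_eq_mod ((-a).toNat - 1) 8
      norm_num at this; rw [Nat.and_comm]; exact this
    omega

lemma shiftR8 (a : Int) : a >>> (8:Nat) = a / 256 := by
  rw [Int.shiftRight_eq_div_pow]; norm_num

-- hex-formatting facts
lemma hexCore_lt (n : Nat) (h : n < 16) : hexCore n = [hexDigit n] := by
  rw [hexCore]; simp [h]

lemma hexCore_ge (n : Nat) (h : ¬ n < 16) : hexCore n = hexCore (n / 16) ++ [hexDigit (n % 16)] := by
  rw [hexCore]; simp [h]

lemma fmtHex2_eq (m : Nat) (h : m < 256) :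
    fmtHex 2 (m : Int) = [hexDigit (m / 16), hexDigit (m % 16)] := by
  unfold fmtHex
  rw [if_neg (by omega)]
  by_cases h16 : m < 16
  · rw [Int.toNat_natCast, hexCore_lt m h16]
    have h1 : m / 16 = 0 := by omega
    have h2 : m % 16 = m := by omega
    simp [h1, h2, hexDigit]
  · rw [Int.toNat_natCast, hexCore_ge m h16, hexCore_lt (m / 16) (by omega)]
    simp

lemma fmtHex4_eq (n : Nat) (h : n < 65536) :
    fmtHex 4 (n : Int) = fmtHex 2 ((n / 256 : Nat) : Int) ++ fmtHex 2 ((n % 256 : Nat) : Int) := by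
  rw [fmtHex2_eq (n / 256) (by omega), fmtHex2_eq (n % 256) (by omega)]
  unfold fmtHex
  rw [if_neg (by omega), Int.toNat_natCast]
  by_cases h1 : n < 16
  · rw [hexCore_lt n h1]
    have e1 : n / 256 / 16 = 0 := by omega
    have e2 : n / 256 % 16 = 0 := by omega
    have e3 : n % 256 / 16 = 0 := by omega
    have e4 : n % 256 % 16 = n := by omega
    simp [e1, e2, e3, e4, hexDigit]
  · by_cases h2 : n < 256
    · rw [hexCore_ge n h1, hexCore_lt (n / 16) (by omega)]
      have e1 : n / 256 / 16 = 0 := by omega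
      have e2 : n / 256 % 16 = 0 := by omega
      have e3 : n % 256 / 16 = n / 16 := by omega
      have e4 : n % 256 % 16 = n % 16 := by omega
      simp [e1, e2, e3, e4, hexDigit]
    · by_cases h3 : n < 4096
      · rw [hexCore_ge n h1, hexCore_ge (n / 16) (by omega), hexCore_lt (n / 16 / 16) (by omega)]
        have e1 : n / 256 / 16 = 0 := by omega
        have e2 : n / 256 % 16 = n / 16 / 16 := by omega
        have e3 : n % 256 / 16 = n / 16 % 16 := by omega
        have e4 : n % 256 % 16 = n % 16 := by omega
        simp [e1, e2, e3, e4, hexDigit]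
      · rw [hexCore_ge n h1, hexCore_ge (n / 16) (by omega), hexCore_ge (n / 16 / 16) (by omega),
          hexCore_lt (n / 16 / 16 / 16) (by omega)]
        have e1 : n / 256 / 16 = n / 16 / 16 / 16 := by omega
        have e2 : n / 256 % 16 = n / 16 / 16 % 16 := by omega
        have e3 : n % 256 / 16 = n / 16 % 16 := by omega
        have e4 : n % 256 % 16 = n % 16 := by omega
        simp [e1, e2, e3, e4]

lemma fmtHex4_split (u : Int) (h0 : 0 ≤ u) (h1 : u < 65536) :
    fmtHex 4 u = fmtHex 2 (PySem.Int.band (u >>> (8:Nat)) 255) ++ fmtHex 2 (PySem.Int.band u 255) := by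
  obtain ⟨n, rfl⟩ : ∃ n : Nat, u = (n : Int) := ⟨u.toNat, by omega⟩
  have hn : n < 65536 := by exact_mod_cast h1
  have e1 : PySem.Int.band ((n : Int) >>> (8:Nat)) 255 = ((n / 256 : Nat) : Int) := by
    rw [shiftR8, band_255]; omega
  have e2 : PySem.Int.band (n : Int) 255 = ((n % 256 : Nat) : Int) := by
    rw [band_255]; omega
  rw [e1, e2, fmtHex4_eq n hn]

-- segLoop matches process started from any sentinel value
lemma process_eq (cs : List (Int × List Int)) : ∀ last : Int,
    process cs last =
      (cs.takeWhile (fun c => chunkUpper c == last)).map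
          (fun c => emitRecord (c.2.length : Int) (PySem.Int.band c.1 0xFFFF) 0x00 c.2) ++
        segLoop (cs.dropWhile (fun c => chunkUpper c == last)) := by
  induction cs with
  | nil => intro last; simp [process, segLoop]
  | cons c tl ih =>
    intro last
    rw [process, List.takeWhile_cons, List.dropWhile_cons]
    by_cases h : chunkUpper c = last
    · simp only [h, beq_self_eq_true, if_true, List.nil_append, List.map_cons]
      rw [ih last, ← h]
      rfl
    · have hb : (chunkUpper c == last) = false := by simp [h]
      simp only [if_neg h, hb, Bool.false_eq_true, if_false, List.map_nil, List.nil_append]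
      rw [segLoop]
      simp only [List.takeWhile_cons, List.dropWhile_cons, beq_self_eq_true, if_true]
      rw [ih (chunkUpper c)]
      rfl

lemma pyRange16_nil (a b : Int) (h : b ≤ a) : PySem.List.pyRange a b 16 = [] := by
  rw [PySem.List.pyRange_of_pos a b (by norm_num), if_neg (by omega)]
  simp

lemma pyRange16_cons (a b : Int) (h : a < b) :
    PySem.List.pyRange a b 16 = a :: PySem.List.pyRange (a + 16) b 16 := by
  rw [PySem.List.pyRange_of_pos a b (by norm_num),
    PySem.List.pyRange_of_pos (a + 16) b (by norm_num), if_pos h]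
  by_cases h2 : a + 16 < b
  · rw [if_pos h2]
    have hc : ((b - a + 16 - 1) / 16).toNat = ((b - (a + 16) + 16 - 1) / 16).toNat + 1 := by omega
    rw [hc, List.range_succ_eq_map, List.map_cons, List.map_map]
    congr 1
    · norm_num
    · apply List.map_congr_left
      intro k _
      simp only [Function.comp]
      push_cast
      ring
  · rw [if_neg h2]
    have hc : ((b - a + 16 - 1) / 16).toNat = 1 := by omega
    rw [hc]
    simp

lemma take_min16 {α : Type} (l : List α) (off : Nat) :
    (l.drop off).take (min 16 (l.length - off)) = (l.drop off).take 16 := by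
  by_cases h : l.length - off ≤ 16
  · have hm : min 16 (l.length - off) = l.length - off := by omega
    have hlen : (l.drop off).length = l.length - off := by simp
    rw [hm, List.take_of_length_le (by omega), List.take_of_length_le (by omega)]
  · have hm : min 16 (l.length - off) = 16 := by omega
    rw [hm]

-- chunk list of B equals A's chunk walk
lemma range_chunks_aux (address : Int) (data : List Int) : ∀ (k offset : Nat),
    data.length ≤ offset + k →
    (PySem.List.pyRange (offset : Int) (data.length : Int) 16).map
        (fun off => (address + off, PySem.List.slice data (some off) (some (off + 16)))) =
      chunksFrom address data offset := by
  intro k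
  induction k with
  | zero =>
    intro offset hk
    rw [pyRange16_nil _ _ (by omega), chunksFrom, dif_neg (by omega)]
    simp
  | succ k ih =>
    intro offset hk
    by_cases hlt : offset < data.length
    · rw [pyRange16_cons _ _ (by exact_mod_cast hlt), List.map_cons, chunksFrom, dif_pos hlt]
      have hslice : PySem.List.slice data (some (offset : Int)) (some ((offset : Int) + 16)) =
          (data.drop offset).take 16 := by
        rw [PySem.List.slice_toNat data (by omega) (by omega)]
        have h1 : (((offset : Int)) + 16).toNat - ((offset : Int)).toNat = 16 := by omega
        have h2 : ((offset : Int)).toNat = offset := by omega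
        rw [h1, h2]
      rw [hslice]
      congr 1
      · have hcast : ((offset : Int) + 16) = ((offset + 16 : Nat) : Int) := by push_cast; ring
        rw [hcast]
        by_cases h16 : data.length - offset ≤ 16
        · have hm : offset + min 16 (data.length - offset) = offset + (data.length - offset) := by omega
          rw [hm, pyRange16_nil _ _ (by omega), chunksFrom, dif_neg (by omega)]
          simp
        · have hm : offset + min 16 (data.length - offset) = offset + 16 := by omega
          rw [hm]
          exact ih (offset + 16) (by omega)
    · rw [pyRange16_nil _ _ (by omega), chunksFrom, dif_neg (by omega)]
      simp

lemma range_chunks (address : Int) (data : List Int) :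
    (PySem.List.pyRange 0 (data.length : Int) 16).map
        (fun off => (address + off, PySem.List.slice data (some off) (some (off + 16)))) =
      chunksFrom address data 0 := by
  have := range_chunks_aux address data data.length 0 (by omega)
  simpa using this

-- the two record-line equalities
lemma band_idem (a : Int) : PySem.Int.band (PySem.Int.band a 65535) 65535 = PySem.Int.band a 65535 := by
  simp only [band_65535]
  omega

lemma extLine_eq (u : Int) (h0 : 0 ≤ u) (h1 : u < 65536) :
    String.ofList (':' :: fmtHex 2 2 ++ fmtHex 4 0 ++ fmtHex 2 4 ++ fmtHex 4 u ++
        fmtHex 2 (PySem.Int.band (([2, 0, 0, 4, PySem.Int.band (u >>> (8:Nat)) 255,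
          PySem.Int.band u 255].sum).not + 1) 255)) = extLine u := by
  unfold extLine emitRecord
  have hz1 : PySem.Int.band ((0:Int) >>> (8:Nat)) 255 = 0 := by decide
  have hz2 : PySem.Int.band (0:Int) 255 = 0 := by decide
  have hz3 : PySem.Int.band (0:Int) 65535 = 0 := by decide
  simp only [hz1, hz2, hz3, List.map_cons, List.map_nil, List.flatten,
    List.sum_cons, List.sum_nil]
  rw [fmtHex4_split u h0 h1]
  simp [List.append_assoc]

lemma dataLine_eq (addr : Int) (chunk : List Int) :
    String.ofList (':' :: fmtHex 2 (chunk.length : Int) ++ fmtHex 4 (PySem.Int.band addr 65535) ++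
        fmtHex 2 0 ++ (chunk.map (fun b => fmtHex 2 b)).flatten ++
        fmtHex 2 (PySem.Int.band ((([(chunk.length : Int),
          PySem.Int.band (PySem.Int.band addr 65535 >>> (8:Nat)) 255,
          PySem.Int.band (PySem.Int.band addr 65535) 255, 0] ++ chunk).sum).not + 1) 255)) =
      dataLine (addr, chunk) := by
  unfold dataLine emitRecord
  simp only [band_idem]

-- A's loop produces process of the chunk walk
lemma loop_eq (address : Int) (data : List Int) : ∀ (k offset : Nat) (lastUpper : Int) (lines : List String),
    data.length ≤ offset + k →
    binToHexLoop address data offset lastUpper lines =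
      lines ++ process (chunksFrom address data offset) lastUpper := by
  intro k
  induction k with
  | zero =>
    intro offset lastUpper lines hk
    rw [binToHexLoop, dif_neg (by omega), chunksFrom, dif_neg (by omega)]
    simp [process]
  | succ k ih =>
    intro offset lastUpper lines hk
    by_cases hlt : offset < data.length
    · rw [binToHexLoop, dif_pos hlt, chunksFrom, dif_pos hlt]
      have hslice : PySem.List.slice data (some (offset : Int))
          (some ((offset : Int) + ((min 16 (data.length - offset) : Nat) : Int))) =
          (data.drop offset).take 16 := by
        rw [PySem.List.slice_toNat data (by omega) (by omega)]
        have h1 : (((offset : Int)) + ((min 16 (data.length - offset) : Nat) : Int)).toNat -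
            ((offset : Int)).toNat = min 16 (data.length - offset) := by omega
        have h2 : ((offset : Int)).toNat = offset := by omega
        rw [h1, h2, take_min16]
      have hclen : ((min 16 (data.length - offset) : Nat) : Int) =
          (((data.drop offset).take 16).length : Int) := by simp
      simp only [process, chunkUpper, hslice]
      simp only [hclen]
      by_cases hu : PySem.Int.band ((address + (offset : Int)) >>> (16:Nat)) 65535 = lastUpper
      · rw [if_neg (not_not_intro hu), if_pos hu]
        rw [ih (offset + min 16 (data.length - offset)) _ _ (by omega)]
        rw [dataLine_eq]
        rw [← hu]
        simp [List.append_assoc]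
      · rw [if_pos hu, if_neg hu]
        rw [ih (offset + min 16 (data.length - offset)) _ _ (by omega)]
        have hu0 : 0 ≤ PySem.Int.band ((address + (offset : Int)) >>> (16:Nat)) 65535 := by
          rw [band_65535]; omega
        have hu1 : PySem.Int.band ((address + (offset : Int)) >>> (16:Nat)) 65535 < 65536 := by
          rw [band_65535]; omega
        rw [extLine_eq _ hu0 hu1, dataLine_eq]
        simp [List.append_assoc]
    · rw [binToHexLoop, dif_neg hlt, chunksFrom, dif_neg hlt]
      simp [process]

-- ===== VERDICT (by name: the statement is the Claim_ definition above) =====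
theorem bin_to_hex_line_spec : Claim_equal_bin_to_hex_line := by
  intro address data _
  unfold Spec_bin_to_hex_line bin_to_hex_line bin_to_hex_line_alt
  rw [loop_eq address data data.length 0 (-1) [] (by omega)]
  simp only [range_chunks, List.nil_append]
  generalize chunksFrom address data 0 = cs
  cases cs with
  | nil => simp [process, segLoop]
  | cons c tl =>
    rw [process_eq]
    have hne : (chunkUpper c == (-1 : Int)) = false := by
      have : 0 ≤ chunkUpper c := by simp only [chunkUpper, band_65535]; omega
      simp only [beq_eq_false_iff_ne, ne_eq]
      omega
    rw [List.takeWhile_cons, List.dropWhile_cons, hne]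
    simp
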